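-- pv_equiv track=rewrite | github.com/AvitusCode/BookFinder | border_segmentation.py | make_points_set
-- ===== SOURCE A (Python) =====
-- def make_points_set(points):
--     pset = []
--     i = 0
--     while i < len(points):
--         t = []
--
--         while i < len(points) - 1:
--             if points[i + 1][0][0] - points[i][0][0] <= 20:
--                 t.append(i)
--                 i += 1
--             else:
--                 break
--
--         t.append(i)
--         pset.append(t)
--         i += 1
--
--     return pset
-- ===== SOURCE B (Python) =====
-- def make_points_set(points):
--     pset = []
--     for i in range(len(points)):
--         if i > 0 and points[i][0][0] - points[i - 1][0][0] <= 20: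
--             pset[-1].append(i)
--         else:
--             pset.append([i])
--     return pset
-- ===== Notes on version B (the rewrite author's own statement) =====
-- stated objective: simpler
-- what changed: Replaced A's nested while-loops with manual index advancement by one flat for-loop that compares each point to its predecessor and either appends the index to the last group or starts a new group.
import Mathlib
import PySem

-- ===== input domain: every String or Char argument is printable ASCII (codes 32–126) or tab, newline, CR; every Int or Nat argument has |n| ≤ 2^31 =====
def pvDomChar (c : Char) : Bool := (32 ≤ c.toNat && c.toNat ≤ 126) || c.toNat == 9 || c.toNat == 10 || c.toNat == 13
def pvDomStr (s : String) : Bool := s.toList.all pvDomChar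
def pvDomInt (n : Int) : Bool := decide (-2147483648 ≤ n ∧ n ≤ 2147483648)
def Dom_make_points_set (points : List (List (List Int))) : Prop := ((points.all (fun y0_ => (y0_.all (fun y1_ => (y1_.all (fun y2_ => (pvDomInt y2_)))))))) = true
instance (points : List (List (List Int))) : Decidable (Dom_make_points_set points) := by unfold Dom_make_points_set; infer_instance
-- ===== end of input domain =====

-- B replaces A's nested while-loops by one flat forward pass that compares each
-- point to its predecessor and appends to the last group or starts a new one (simpler).


-- ===== PORT A =====
-- points[j][0][0]; under Pre_ the accessed entries exist, so the defaults are never used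
def pvX (points : List (List (List Int))) (j : Nat) : Int :=
  ((points.getD j []).headD []).headD 0

-- inner while loop of A: appends i while the gap to the next point is ≤ 20, then
-- appends the final i.  The fuel argument only makes the recursion structural; it is
-- called with fuel = points.length, which the loop can never exhaust.
def mpsInner (points : List (List (List Int))) : Nat → Nat → List Int → List Int × Nat
  | 0, i, t => (t ++ [(i : Int)], i)
  | fuel + 1, i, t =>
    if i < points.length - 1 then
      if pvX points (i + 1) - pvX points i ≤ 20 then
        mpsInner points fuel (i + 1) (t ++ [(i : Int)])
      else (t ++ [(i : Int)], i)
    else (t ++ [(i : Int)], i)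

-- outer while loop of A (same fuel guard; i advances by at least 1 per iteration)
def mpsOuter (points : List (List (List Int))) : Nat → Nat → List (List Int)
  | 0, _ => []
  | fuel + 1, i =>
    if i < points.length then
      (mpsInner points points.length i []).1 ::
        mpsOuter points fuel ((mpsInner points points.length i []).2 + 1)
    else []

def make_points_set (points : List (List (List Int))) : List (List Int) :=
  mpsOuter points points.length 0

-- ===== PORT B =====
-- one iteration of B's for-loop: extend the last group or start a new one
def mpsStep (points : List (List (List Int))) (pset : List (List Int)) (i : Nat) : List (List Int) :=
  if 0 < i ∧ pvX points i - pvX points (i - 1) ≤ 20 then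
    pset.dropLast ++ [pset.getLast?.getD [] ++ [(i : Int)]]
  else pset ++ [[(i : Int)]]

def make_points_set_alt (points : List (List (List Int))) : List (List Int) :=
  (List.range points.length).foldl (mpsStep points) []

-- ===== PRECONDITION & SPEC =====
-- Pre_ excludes exactly the inputs where Python A (and B) raise IndexError:
-- with ≥ 2 points, every point must have a nonempty first coordinate list.
def Pre_make_points_set (points : List (List (List Int))) : Prop :=
  points.length ≤ 1 ∨ ∀ p ∈ points, p.headD [] ≠ []
instance (points : List (List (List Int))) : Decidable (Pre_make_points_set points) := by
  unfold Pre_make_points_set; infer_instance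

def pvWitness_make_points_set : List (List (List Int)) := [[[0]], [[15]], [[40]]]

def Spec_make_points_set (points : List (List (List Int))) (out : List (List Int)) : Prop := out = make_points_set_alt points
instance (points : List (List (List Int))) (out : List (List Int)) : Decidable (Spec_make_points_set points out) := by unfold Spec_make_points_set; infer_instance

-- ===== CLAIM (what is proved, stated in full; the proofs are below) =====
def Claim_equal_make_points_set : Prop := ∀ (points : List (List (List Int))), Dom_make_points_set points → Pre_make_points_set points → Spec_make_points_set points (make_points_set points)

-- ===== LEMMAS AND PROOFS =====

-- the inner loop never moves the index backwards
theorem mpsInner_le (points : List (List (List Int))) :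
    ∀ f i t, i ≤ (mpsInner points f i t).2 := by
  intro f
  induction f with
  | zero => intro i t; simp [mpsInner]
  | succ f ih =>
    intro i t
    rw [mpsInner]
    split_ifs with h1 h2
    · exact le_trans (by omega) (ih (i + 1) (t ++ [(i : Int)]))
    · simp
    · simp

-- any fuel large enough to finish the inner loop gives the same result
theorem mpsInner_fuel (points : List (List (List Int))) :
    ∀ f g i t, points.length - 1 - i ≤ f → points.length - 1 - i ≤ g →
      mpsInner points f i t = mpsInner points g i t := by
  intro f
  induction f with
  | zero =>
    intro g i t hf hg
    have h1 : ¬ i < points.length - 1 := by omega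
    cases g with
    | zero => rfl
    | succ g => rw [mpsInner, mpsInner]; simp [h1]
  | succ f ih =>
    intro g i t hf hg
    cases g with
    | zero =>
      have h1 : ¬ i < points.length - 1 := by omega
      rw [mpsInner, mpsInner]; simp [h1]
    | succ g =>
      rw [mpsInner, mpsInner]
      split_ifs with h1 h2
      · exact ih g (i + 1) (t ++ [(i : Int)]) (by omega) (by omega)
      · rfl
      · rfl

-- the inner-loop accumulator is only ever appended to
theorem mpsInner_append (points : List (List (List Int))) :
    ∀ f i t, mpsInner points f i t = (t ++ (mpsInner points f i []).1, (mpsInner points f i []).2) := by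
  intro f
  induction f with
  | zero => intro i t; simp [mpsInner]
  | succ f ih =>
    intro i t
    conv_lhs => rw [mpsInner]
    conv_rhs => rw [mpsInner]
    split_ifs with h1 h2
    · rw [ih (i + 1) (t ++ [(i : Int)]), ih (i + 1) (([] : List Int) ++ [(i : Int)])]
      simp
    · simp
    · simp

-- any fuel large enough to finish the outer loop gives the same result
theorem mpsOuter_fuel (points : List (List (List Int))) :
    ∀ f g i, points.length - i ≤ f → points.length - i ≤ g →
      mpsOuter points f i = mpsOuter points g i := by
  intro f
  induction f with
  | zero =>
    intro g i hf hg
    have h1 : ¬ i < points.length := by omega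
    cases g with
    | zero => rfl
    | succ g => rw [mpsOuter, mpsOuter]; simp [h1]
  | succ f ih =>
    intro g i hf hg
    cases g with
    | zero =>
      have h1 : ¬ i < points.length := by omega
      rw [mpsOuter, mpsOuter]; simp [h1]
    | succ g =>
      rw [mpsOuter, mpsOuter]
      by_cases h1 : i < points.length
      · simp only [h1, if_true]
        have hle := mpsInner_le points points.length i []
        rw [ih g ((mpsInner points points.length i []).2 + 1) (by omega) (by omega)]
      · simp [h1]

theorem mpsOuter_unfold (points : List (List (List Int))) (i : Nat) (hi : i < points.length) :
    mpsOuter points points.length i =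
      (mpsInner points points.length i []).1 ::
        mpsOuter points points.length ((mpsInner points points.length i []).2 + 1) := by
  have h : points.length = (points.length - 1) + 1 := by omega
  conv_lhs => rw [h, mpsOuter]
  simp only [hi, if_true]
  have hle := mpsInner_le points points.length i []
  rw [mpsOuter_fuel points (points.length - 1) points.length
      ((mpsInner points points.length i []).2 + 1) (by omega) (by omega)]

theorem mpsOuter_nil (points : List (List (List Int))) (f i : Nat) (hi : ¬ i < points.length) :
    mpsOuter points f i = [] := by
  cases f with
  | zero => rfl
  | succ f => rw [mpsOuter]; simp [hi]

-- one unfolding of the inner loop at full fuel, small-gap case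
theorem mpsInner_cons (points : List (List (List Int))) (i : Nat)
    (h1 : i < points.length - 1) (h2 : pvX points (i + 1) - pvX points i ≤ 20) :
    mpsInner points points.length i [] =
      ([(i : Int)] ++ (mpsInner points points.length (i + 1) []).1,
        (mpsInner points points.length (i + 1) []).2) := by
  have h : points.length = (points.length - 1) + 1 := by omega
  conv_lhs => rw [h, mpsInner]
  simp only [h1, h2, if_true, List.nil_append]
  rw [mpsInner_fuel points (points.length - 1) points.length (i + 1) [(i : Int)]
      (by omega) (by omega)]
  rw [mpsInner_append points points.length (i + 1) [(i : Int)]]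

-- one unfolding of the inner loop at full fuel, stopping case
theorem mpsInner_stop (points : List (List (List Int))) (i : Nat)
    (h : ¬ (i < points.length - 1 ∧ pvX points (i + 1) - pvX points i ≤ 20)) :
    mpsInner points points.length i [] = ([(i : Int)], i) := by
  by_cases h1 : i < points.length - 1
  · have hlen : points.length = (points.length - 1) + 1 := by omega
    conv_lhs => rw [hlen, mpsInner]
    simp only [h1, if_true]
    have h2 : ¬ pvX points (i + 1) - pvX points i ≤ 20 := fun h2 => h ⟨h1, h2⟩
    simp [h2]
  · cases hf : points.length with
    | zero => simp [mpsInner]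
    | succ f => rw [mpsInner]; simp [h1]

-- INN: folding B's step over the remaining indices, starting from a state whose last
-- group ends with i, produces A's inner run attached to that group, then A's outer rest.
theorem inn (points : List (List (List Int))) :
    ∀ d i base g, points.length - i ≤ d → i < points.length →
      List.foldl (mpsStep points) (base ++ [g ++ [(i : Int)]])
          (List.range' (i + 1) (points.length - (i + 1))) =
        base ++ ((g ++ (mpsInner points points.length i []).1) ::
          mpsOuter points points.length ((mpsInner points points.length i []).2 + 1)) := by
  intro d
  induction d with
  | zero => intro i base g hd hi; omega
  | succ d ih =>
    intro i base g hd hi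
    by_cases h1 : i < points.length - 1
    · have hrange : List.range' (i + 1) (points.length - (i + 1)) =
          (i + 1) :: List.range' (i + 2) (points.length - (i + 2)) := by
        have : points.length - (i + 1) = (points.length - (i + 2)) + 1 := by omega
        rw [this, List.range'_succ]
      by_cases h2 : pvX points (i + 1) - pvX points i ≤ 20
      · -- gap small: B appends i+1 to the last group, A's inner loop continues
        rw [hrange]
        simp only [List.foldl_cons]
        have hstep : mpsStep points (base ++ [g ++ [(i : Int)]]) (i + 1) =
            base ++ [(g ++ [(i : Int)]) ++ [((i + 1 : Nat) : Int)]] := by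
          simp [mpsStep, h2]
        rw [hstep, ih (i + 1) base (g ++ [(i : Int)]) (by omega) (by omega)]
        rw [mpsInner_cons points i h1 h2]
        simp
      · -- gap large: A's inner loop stops at i; B starts a new group at i+1
        rw [hrange]
        simp only [List.foldl_cons]
        have hstep : mpsStep points (base ++ [g ++ [(i : Int)]]) (i + 1) =
            (base ++ [g ++ [(i : Int)]]) ++ [([] : List Int) ++ [((i + 1 : Nat) : Int)]] := by
          simp [mpsStep, h2]
        rw [hstep]
        rw [show (i + 2) = (i + 1) + 1 from rfl]
        rw [ih (i + 1) (base ++ [g ++ [(i : Int)]]) [] (by omega) (by omega)]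
        rw [mpsInner_stop points i (by tauto)]
        rw [mpsOuter_unfold points (i + 1) (by omega)]
        simp
    · -- i is the last index: nothing left to fold, A's inner loop is the singleton [i]
      have hlen : points.length = i + 1 := by omega
      rw [mpsInner_stop points i (by omega)]
      rw [mpsOuter_nil points points.length (i + 1) (by omega)]
      simp [hlen]

theorem fold_eq_outer (points : List (List (List Int))) (i : Nat) (base : List (List Int))
    (hi : i < points.length)
    (hstart : i = 0 ∨ ¬ (pvX points i - pvX points (i - 1) ≤ 20)) :
    List.foldl (mpsStep points) base (List.range' i (points.length - i)) =
      base ++ mpsOuter points points.length i := by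
  have hrange : List.range' i (points.length - i) =
      i :: List.range' (i + 1) (points.length - (i + 1)) := by
    have : points.length - i = (points.length - (i + 1)) + 1 := by omega
    rw [this, List.range'_succ]
  rw [hrange]
  simp only [List.foldl_cons]
  have hstep : mpsStep points base i = base ++ [([] : List Int) ++ [(i : Int)]] := by
    rcases hstart with h | h
    · subst h; simp [mpsStep]
    · simp [mpsStep, h]
  rw [hstep, inn points (points.length - i) i base [] (le_refl _) hi]
  rw [mpsOuter_unfold points i hi]
  simp

-- ===== VERDICT (by name: the statement is the Claim_ definition above) =====
theorem make_points_set_spec : Claim_equal_make_points_set := by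
  intro points _ _
  unfold Spec_make_points_set make_points_set make_points_set_alt
  rcases Nat.eq_zero_or_pos points.length with h0 | hpos
  · rw [mpsOuter_nil points points.length 0 (by omega)]
    simp [h0]
  · rw [List.range_eq_range']
    have := fold_eq_outer points 0 [] hpos (Or.inl rfl)
    simpa using this.symm
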